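-- pv_equiv track=rewrite | github.com/AlmightyFuzz/AdventOfCode | AOC21/day10.py | calculate_autocomplete_score
-- ===== SOURCE A (Python) =====
-- def calculate_autocomplete_score(incomplete_chars):
--     score = 0
--
--     for c in incomplete_chars:
--         score = score * 5
--
--         if c == '(':
--             score += 1
--         elif c == '[':
--             score += 2
--         elif c == '{':
--             score += 3
--         elif c == '<':
--             score += 4
--
--     return score
-- ===== SOURCE B (Python) =====
-- def _bracket_value(c):
--     if c == '(':
--         return 1
--     if c == '[':
--         return 2
--     if c == '{':
--         return 3
--     if c == '<':
--         return 4
--     return 0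
--
--
-- def _combine(chars, lo, hi):
--     # returns (base-5 value of chars[lo:hi], 5 ** (hi - lo))
--     if hi - lo == 0:
--         return 0, 1
--     if hi - lo == 1:
--         return _bracket_value(chars[lo]), 5
--     mid = (lo + hi) // 2
--     s1, p1 = _combine(chars, lo, mid)
--     s2, p2 = _combine(chars, mid, hi)
--     return s1 * p2 + s2, p1 * p2
--
--
-- def calculate_autocomplete_score(incomplete_chars):
--     chars = list(incomplete_chars)
--     return _combine(chars, 0, len(chars))[0]
-- ===== Notes on version B (the rewrite author's own statement) =====
-- stated objective: alternative
-- what changed: B computes the base-5 score by recursive divide-and-conquer (value(left)*5^len(right)+value(right)) instead of A's left-to-right Horner loop with an if/elif chain.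
import Mathlib
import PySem

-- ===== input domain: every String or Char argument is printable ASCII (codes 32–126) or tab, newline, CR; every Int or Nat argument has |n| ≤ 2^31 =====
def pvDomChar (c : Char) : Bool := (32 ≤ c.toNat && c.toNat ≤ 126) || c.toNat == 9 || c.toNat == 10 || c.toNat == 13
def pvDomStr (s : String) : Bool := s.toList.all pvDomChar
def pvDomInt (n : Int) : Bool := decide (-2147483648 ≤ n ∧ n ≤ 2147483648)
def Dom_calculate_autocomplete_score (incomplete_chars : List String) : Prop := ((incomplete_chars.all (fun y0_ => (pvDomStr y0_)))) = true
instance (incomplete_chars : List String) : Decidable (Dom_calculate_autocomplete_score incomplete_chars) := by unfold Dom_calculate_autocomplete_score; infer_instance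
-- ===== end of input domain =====

-- ===== PORT A =====
def calculate_autocomplete_score (incomplete_chars : List String) : Int :=
  incomplete_chars.foldl (fun score c =>
    let score := score * 5
    if c = "(" then score + 1
    else if c = "[" then score + 2
    else if c = "{" then score + 3
    else if c = "<" then score + 4
    else score) 0

-- ===== PORT B =====
-- B: divide-and-conquer — combine(lo,hi) returns (base-5 value of chars[lo:hi], 5^(hi-lo)).
def pvBracketValue (c : String) : Int :=
  if c = "(" then 1
  else if c = "[" then 2
  else if c = "{" then 3
  else if c = "<" then 4
  else 0

-- indices satisfy 0 ≤ lo ≤ hi ≤ chars.length at every call, so Python's chars[lo] is List.getD lo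
-- and (lo + hi) // 2 on nonnegative ints is Nat division.
def pvCombine (chars : List String) (lo hi : Nat) : Int × Int :=
  if hi - lo = 0 then (0, 1)
  else if hi - lo = 1 then (pvBracketValue (chars.getD lo ""), 5)
  else
    let mid := (lo + hi) / 2
    let s1p1 := pvCombine chars lo mid
    let s2p2 := pvCombine chars mid hi
    (s1p1.1 * s2p2.2 + s2p2.1, s1p1.2 * s2p2.2)
termination_by hi - lo
decreasing_by all_goals omega

def calculate_autocomplete_score_alt (incomplete_chars : List String) : Int :=
  (pvCombine incomplete_chars 0 incomplete_chars.length).1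

-- ===== PRECONDITION & SPEC =====
def Spec_calculate_autocomplete_score (incomplete_chars : List String) (out : Int) : Prop := out = calculate_autocomplete_score_alt incomplete_chars
instance (incomplete_chars : List String) (out : Int) : Decidable (Spec_calculate_autocomplete_score incomplete_chars out) := by unfold Spec_calculate_autocomplete_score; infer_instance

-- ===== CLAIM (what is proved, stated in full; the proofs are below) =====
def Claim_equal_calculate_autocomplete_score : Prop := ∀ (incomplete_chars : List String), Dom_calculate_autocomplete_score incomplete_chars → Spec_calculate_autocomplete_score incomplete_chars (calculate_autocomplete_score incomplete_chars)

-- ===== LEMMAS AND PROOFS =====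
-- V xs: base-5 value of xs with the first character most significant (Horner form).
def pvV (xs : List String) : Int :=
  xs.foldl (fun s c => s * 5 + pvBracketValue c) 0

theorem pvFoldl_shift (xs : List String) : ∀ (s : Int),
    xs.foldl (fun s c => s * 5 + pvBracketValue c) s = s * 5 ^ xs.length + pvV xs := by
  induction xs with
  | nil => intro s; unfold pvV; simp
  | cons c cs ih =>
    intro s
    have hV : pvV (c :: cs) = pvBracketValue c * 5 ^ cs.length + pvV cs := by
      unfold pvV
      rw [List.foldl_cons, ih, ih]
      ring
    rw [List.foldl_cons, ih, hV, List.length_cons]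
    ring

theorem pvV_append (xs ys : List String) :
    pvV (xs ++ ys) = pvV xs * 5 ^ ys.length + pvV ys := by
  unfold pvV
  rw [List.foldl_append, pvFoldl_shift]
  rfl

theorem pvCombine_eq (chars : List String) (n : Nat) : ∀ (lo hi : Nat), hi - lo = n →
    lo ≤ hi → hi ≤ chars.length →
    pvCombine chars lo hi = (pvV ((chars.drop lo).take (hi - lo)), (5 : Int) ^ (hi - lo)) := by
  induction n using Nat.strong_induction_on with
  | _ n ih =>
    intro lo hi hn hlh hhl
    rw [pvCombine]
    by_cases h0 : hi - lo = 0
    · rw [if_pos h0, h0]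
      unfold pvV
      simp
    · by_cases h1 : hi - lo = 1
      · have hlt : lo < chars.length := by omega
        rw [if_neg h0, if_pos h1, h1, List.drop_eq_getElem_cons hlt,
            List.take_succ_cons, List.take_zero]
        unfold pvV
        simp [List.getD_eq_getElem?_getD, List.getElem?_eq_getElem hlt]
      · rw [if_neg h0, if_neg h1]
        simp only
        generalize hmid : (lo + hi) / 2 = m
        have hm1 : lo < m := by omega
        have hm2 : m < hi := by omega
        rw [ih (m - lo) (by omega) lo m (rfl) (by omega) (by omega),
            ih (hi - m) (by omega) m hi (rfl) (by omega) (by omega)]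
        have hsplit : (chars.drop lo).take (hi - lo)
            = (chars.drop lo).take (m - lo) ++ (chars.drop m).take (hi - m) := by
          have he : hi - lo = (m - lo) + (hi - m) := by omega
          rw [he, List.take_add, List.drop_drop, show lo + (m - lo) = m from by omega]
        rw [hsplit, pvV_append]
        have hlen : ((chars.drop m).take (hi - m)).length = hi - m := by
          simp [List.length_take, List.length_drop]
          omega
        have hpow : (5 : Int) ^ (hi - lo) = 5 ^ (m - lo) * 5 ^ (hi - m) := by
          rw [← pow_add]
          congr 1
          omega
        rw [hlen, hpow]

theorem pvA_eq_V (xs : List String) : calculate_autocomplete_score xs = pvV xs := by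
  unfold calculate_autocomplete_score pvV
  congr 1
  funext s c
  simp only [pvBracketValue]
  split_ifs <;> ring

-- ===== VERDICT (by name: the statement is the Claim_ definition above) =====
theorem calculate_autocomplete_score_spec : Claim_equal_calculate_autocomplete_score := by
  intro xs _
  show calculate_autocomplete_score xs = calculate_autocomplete_score_alt xs
  rw [pvA_eq_V, calculate_autocomplete_score_alt,
      pvCombine_eq xs (xs.length - 0) 0 xs.length rfl (by omega) le_rfl]
  simp
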